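-- pv_equiv track=rewrite | github.com/sruthi2498/SequenceAlignment | hish.py | forwards
-- ===== SOURCE A (Python) =====
-- def forwards(x, y, simMatrix, gapPenalty):
--     # This is the forwards subroutine.
--     n, m = len(x), len(y)
--     mat = []
--     for i in range(n+1):
--         mat.append([0]*(m+1))
--     for j in range(m+1):
--         mat[0][j] = gapPenalty*j
--     for i in range(1, n+1):
--         mat[i][0] = mat[i-1][0] + gapPenalty
--         for j in range(1, m+1):
--             mat[i][j] = min(mat[i-1][j-1] + simMatrix[x[i-1]][y[j-1]],
--                             mat[i-1][j] + gapPenalty,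
--                             mat[i][j-1] + gapPenalty)
--         # Now clear row from memory.
--         mat[i-1] = []
--     return mat[n]
-- ===== SOURCE B (Python) =====
-- def forwards(x, y, simMatrix, gapPenalty):
--     # Transposed (column-major) DP: sweep over y one column at a time and
--     # collect the bottom cell of each column; that sequence IS the final row.
--     n = len(x)
--     col = [gapPenalty * i for i in range(n + 1)]
--     out = [col[n]]
--     for cy in y:
--         diag = col[0]
--         col[0] = diag + gapPenalty
--         for i in range(1, n + 1):
--             temp = col[i]
--             col[i] = min(diag + simMatrix[x[i - 1]][cy],
--                          temp + gapPenalty,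
--                          col[i - 1] + gapPenalty)
--             diag = temp
--         out.append(col[n])
--     return out
-- ===== Notes on version B (the rewrite author's own statement) =====
-- stated objective: alternative
-- what changed: Transposed traversal: instead of filling the table row by row over x and returning the last row, B sweeps column by column over y maintaining one column of length n+1 and builds the answer incrementally from the bottom cell of each column; the Lean proof shows via a recursive DP characterization that the two traversal orders yield the same final row.
import Mathlib
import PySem

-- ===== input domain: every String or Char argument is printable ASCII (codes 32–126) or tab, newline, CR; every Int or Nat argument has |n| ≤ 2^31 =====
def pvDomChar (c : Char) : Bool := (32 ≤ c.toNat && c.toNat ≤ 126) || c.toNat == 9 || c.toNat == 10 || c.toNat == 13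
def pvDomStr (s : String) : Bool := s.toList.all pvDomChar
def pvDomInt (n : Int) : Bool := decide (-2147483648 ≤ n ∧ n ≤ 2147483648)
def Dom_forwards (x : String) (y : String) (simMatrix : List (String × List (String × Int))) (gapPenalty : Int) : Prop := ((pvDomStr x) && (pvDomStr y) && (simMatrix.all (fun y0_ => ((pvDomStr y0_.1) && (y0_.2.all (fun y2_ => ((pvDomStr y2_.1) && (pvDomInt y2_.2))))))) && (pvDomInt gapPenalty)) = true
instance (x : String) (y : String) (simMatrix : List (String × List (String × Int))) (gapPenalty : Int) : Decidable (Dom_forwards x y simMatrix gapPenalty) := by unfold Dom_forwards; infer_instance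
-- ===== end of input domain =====

-- B transposes the traversal: it sweeps column by column over y (one column of length n+1)
-- and collects the bottom cell of each column; proved equal to A's row-by-row final row.

-- ===== PORT A =====
-- s[i] used as a dict key (Python gives a 1-character string); only evaluated in range here
def pvChar (s : String) (i : Int) : String :=
  ((PySem.Str.pyGet? s i).map (fun c => String.singleton c)).getD ""

-- simMatrix[a][b]; none = KeyError (excluded by Pre_)
def pvSim? (simMatrix : List (String × List (String × Int))) (a b : String) : Option Int :=
  ((PySem.Dict.mk simMatrix).get? a).bind (fun r => (PySem.Dict.mk r).get? b)

-- total form of simMatrix[a][b], used by both ports under Pre_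
def pvSimD (simMatrix : List (String × List (String × Int))) (a b : String) : Int :=
  (pvSim? simMatrix a b).getD 0

-- mat[i]
def pvGetRow (mat : List (List Int)) (i : Int) : List Int := PySem.List.pyGetD mat i []
-- mat[i][j]
def pvGet2 (mat : List (List Int)) (i j : Int) : Int := PySem.List.pyGetD (pvGetRow mat i) j 0
-- mat[i][j] = v
def pvSet2 (mat : List (List Int)) (i j : Int) (v : Int) : List (List Int) :=
  PySem.List.pySetD mat i (PySem.List.pySetD (pvGetRow mat i) j v)

def forwards (x : String) (y : String) (simMatrix : List (String × List (String × Int))) (gapPenalty : Int) : List Int :=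
  let n := PySem.Str.len x
  let m := PySem.Str.len y
  let mat : List (List Int) := (PySem.List.pyRange 0 (n+1) 1).foldl
      (fun mat _ => mat ++ [PySem.List.pyRepeat [0] (m+1)]) []
  let mat := (PySem.List.pyRange 0 (m+1) 1).foldl
      (fun mat j => pvSet2 mat 0 j (gapPenalty * j)) mat
  let mat := (PySem.List.pyRange 1 (n+1) 1).foldl (fun mat i =>
      let mat := pvSet2 mat i 0 (pvGet2 mat (i-1) 0 + gapPenalty)
      let mat := (PySem.List.pyRange 1 (m+1) 1).foldl (fun mat j =>
          pvSet2 mat i j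
            (min (min (pvGet2 mat (i-1) (j-1) + pvSimD simMatrix (pvChar x (i-1)) (pvChar y (j-1)))
                      (pvGet2 mat (i-1) j + gapPenalty))
                 (pvGet2 mat i (j-1) + gapPenalty))) mat
      PySem.List.pySetD mat (i-1) ([] : List Int)) mat
  PySem.List.pyGetD mat n []

-- ===== PORT B =====
def forwards_alt (x : String) (y : String) (simMatrix : List (String × List (String × Int))) (gapPenalty : Int) : List Int :=
  let n := PySem.Str.len x
  let col : List Int := (PySem.List.pyRange 0 (n+1) 1).map (fun i => gapPenalty * i)
  let out : List Int := [PySem.List.pyGetD col n 0]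
  (y.toList.foldl (fun (st : List Int × List Int) cy =>
      let diag := PySem.List.pyGetD st.1 0 0
      let col := PySem.List.pySetD st.1 0 (diag + gapPenalty)
      let col := ((PySem.List.pyRange 1 (n+1) 1).foldl (fun (st2 : List Int × Int) i =>
          let temp := PySem.List.pyGetD st2.1 i 0
          (PySem.List.pySetD st2.1 i
             (min (min (st2.2 + pvSimD simMatrix (pvChar x (i-1)) (String.singleton cy)) (temp + gapPenalty))
                  (PySem.List.pyGetD st2.1 (i-1) 0 + gapPenalty)),
           temp))
        (col, diag)).1
      (col, st.2 ++ [PySem.List.pyGetD col n 0])) (col, out)).2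

-- ===== PRECONDITION & SPEC =====
-- Pre_ excludes exactly the inputs on which Python A raises KeyError: some character of x
-- (or of y) is missing as a key of simMatrix (resp. of the matching inner dict).
def Pre_forwards (x : String) (y : String) (simMatrix : List (String × List (String × Int))) (gapPenalty : Int) : Prop :=
  (x.toList.all (fun a => y.toList.all (fun b =>
    (pvSim? simMatrix (String.singleton a) (String.singleton b)).isSome))) = true
instance (x : String) (y : String) (simMatrix : List (String × List (String × Int))) (gapPenalty : Int) : Decidable (Pre_forwards x y simMatrix gapPenalty) := by unfold Pre_forwards; infer_instance

def pvWitness_forwards : String × String × (List (String × List (String × Int))) × Int :=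
  ("ab", "ba", [("a", [("a", 0), ("b", 3)]), ("b", [("a", 3), ("b", 0)])], 2)

def Spec_forwards (x : String) (y : String) (simMatrix : List (String × List (String × Int))) (gapPenalty : Int) (out : List Int) : Prop := out = forwards_alt x y simMatrix gapPenalty
instance (x : String) (y : String) (simMatrix : List (String × List (String × Int))) (gapPenalty : Int) (out : List Int) : Decidable (Spec_forwards x y simMatrix gapPenalty out) := by unfold Spec_forwards; infer_instance

-- ===== CLAIM (what is proved, stated in full; the proofs are below) =====
def Claim_equal_forwards : Prop := ∀ (x : String) (y : String) (simMatrix : List (String × List (String × Int))) (gapPenalty : Int), Dom_forwards x y simMatrix gapPenalty → Pre_forwards x y simMatrix gapPenalty → Spec_forwards x y simMatrix gapPenalty (forwards x y simMatrix gapPenalty)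

-- ===== LEMMAS AND PROOFS =====

-- the common inner recurrence: d = diagonal, l = value just written, p = old value at this index, w = substitution score
def pvGo (g : Int) : Int → Int → List Int → List Int → List Int
  | d, l, p :: ps, w :: ws =>
      min (min (d + w) (p + g)) (l + g) :: pvGo g p (min (min (d + w) (p + g)) (l + g)) ps ws
  | _, _, _, _ => []

-- one row step of A's DP
def pvStep (simMatrix : List (String × List (String × Int))) (yL : List Char) (g : Int)
    (R : List Int) (cx : Char) : List Int :=
  match R with
  | [] => []
  | r0 :: rs => (r0 + g) :: pvGo g r0 (r0 + g) rs
      (yL.map (fun cy => pvSimD simMatrix (String.singleton cx) (String.singleton cy)))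

-- the substitution weight both programs look up
def pvW (simMatrix : List (String × List (String × Int))) (a b : Char) : Int :=
  pvSimD simMatrix (String.singleton a) (String.singleton b)

-- the DP value itself, on REVERSED prefixes of x and y
def pvE (w : Char → Char → Int) (g : Int) : List Char → List Char → Int
  | [], ys => g * ys.length
  | _ :: xs, [] => pvE w g xs [] + g
  | a :: xs, b :: ys =>
      min (min (pvE w g xs ys + w a b) (pvE w g xs (b :: ys) + g)) (pvE w g (a :: xs) ys + g)
termination_by xs ys => xs.length + ys.length

-- the tail of a DP row (x-prefix rx fixed, y-prefix ry growing along bs)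
def pvRowOf (w : Char → Char → Int) (g : Int) (rx : List Char) : List Char → List Char → List Int
  | _, [] => []
  | ry, b :: bs => pvE w g rx (b :: ry) :: pvRowOf w g rx (b :: ry) bs

-- the tail of a DP column (y-prefix ry fixed, x-prefix rx growing along as)
def pvColOf (w : Char → Char → Int) (g : Int) (ry : List Char) : List Char → List Char → List Int
  | _, [] => []
  | rx, a :: as => pvE w g (a :: rx) ry :: pvColOf w g ry (a :: rx) as

lemma pvGo_length (g : Int) : ∀ (ps ws : List Int) (d l : Int),
    (pvGo g d l ps ws).length = min ps.length ws.length := by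
  intro ps
  induction ps with
  | nil => intro ws d l; cases ws <;> simp [pvGo]
  | cons p pt ih => intro ws d l; cases ws with
    | nil => simp [pvGo]
    | cons w wt => simp [pvGo, ih]

lemma pvGetD_mid {α : Type} (acc : List α) (v : α) (zs : List α) (d : α) :
    (acc ++ v :: zs).getD acc.length d = v := by
  induction acc with
  | nil => simp
  | cons a t ih => simp [ih]

lemma pvSet_mid {α : Type} (acc : List α) (v w : α) (zs : List α) :
    (acc ++ v :: zs).set acc.length w = acc ++ w :: zs := by
  induction acc with
  | nil => simp
  | cons a t ih => simp [ih]

lemma pvGetD_mid1 {α : Type} (acc : List α) (l v : α) (zs : List α) (d : α) :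
    (acc ++ l :: v :: zs).getD (acc.length + 1) d = v := by
  induction acc <;> simp [*]

lemma pvSet_mid1 {α : Type} (acc : List α) (l v w : α) (zs : List α) :
    (acc ++ l :: v :: zs).set (acc.length + 1) w = acc ++ l :: w :: zs := by
  induction acc <;> simp [*]

lemma pvGetD_midR {α : Type} (k : Nat) (x v : α) (zs : List α) (d : α) :
    (List.replicate k x ++ v :: zs).getD k d = v := by
  simpa using pvGetD_mid (List.replicate k x) v zs d

lemma pvGetD_midR1 {α : Type} (k : Nat) (x v w : α) (zs : List α) (d : α) :
    (List.replicate k x ++ v :: w :: zs).getD (k + 1) d = w := by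
  simpa using pvGetD_mid1 (List.replicate k x) v w zs d

lemma pvSet_midR {α : Type} (k : Nat) (x v w : α) (zs : List α) :
    (List.replicate k x ++ v :: zs).set k w = List.replicate k x ++ w :: zs := by
  simpa using pvSet_mid (List.replicate k x) v w zs

lemma pvSet_midR1 {α : Type} (k : Nat) (x v w u : α) (zs : List α) :
    (List.replicate k x ++ v :: w :: zs).set (k + 1) u = List.replicate k x ++ v :: u :: zs := by
  simpa using pvSet_mid1 (List.replicate k x) v w u zs

lemma pvGetD_of_drop {α : Type} (P : List α) (n : Nat) (d : α) (qs : List α) (dflt : α)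
    (h : P.drop n = d :: qs) : P.getD n dflt = d := by
  rw [List.getD_eq_getElem?_getD, ← List.head?_drop, h]; rfl

-- char-at lemma: pvChar at a valid Nat index is the singleton of the character
lemma pvChar_natCast (s : String) (k : Nat) (c : Char) (h : s.toList[k]? = some c) :
    pvChar s (k : Int) = String.singleton c := by
  simp [pvChar, h]

-- ===== A-side loop lemmas =====

lemma pvInnerA (simMatrix : List (String × List (String × Int))) (g : Int) (y : String)
    (cxS : String) (E post : List (List Int)) (P : List Int) (iv : Int)
    (hiv : iv = (E.length : Int) + 1) :
    ∀ (ws qs zs acc : List Int) (l d : Int),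
    qs.length = ws.length → zs.length = ws.length →
    P.drop acc.length = d :: qs →
    (∀ t, t < ws.length → pvSimD simMatrix cxS (pvChar y ((acc.length + t : Nat) : Int)) = ws.getD t 0) →
    (PySem.List.pyRange ((acc.length : Int) + 1) ((acc.length : Int) + 1 + ws.length) 1).foldl
      (fun mat j => pvSet2 mat iv j
          (min (min (pvGet2 mat (iv-1) (j-1) + pvSimD simMatrix cxS (pvChar y (j-1)))
                    (pvGet2 mat (iv-1) j + g))
               (pvGet2 mat iv (j-1) + g)))
      (E ++ P :: (acc ++ l :: zs) :: post)
    = E ++ P :: (acc ++ l :: pvGo g d l qs ws) :: post := by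
  subst hiv
  intro ws
  induction ws with
  | nil =>
    intro qs zs acc l d hq hz hdrop hF
    have hq0 : qs = [] := List.eq_nil_of_length_eq_zero (by simpa using hq)
    have hz0 : zs = [] := List.eq_nil_of_length_eq_zero (by simpa using hz)
    subst hq0; subst hz0
    simp [PySem.List.pyRange_one_eq_nil, pvGo]
  | cons w wt ih =>
    intro qs zs acc l d hq hz hdrop hF
    cases qs with
    | nil => simp at hq
    | cons q qt =>
    cases zs with
    | nil => simp at hz
    | cons z zt =>
    simp only [List.length_cons] at hq hz hF ⊢
    have hlt : ((acc.length : Int) + 1) < (acc.length : Int) + 1 + ((wt.length + 1 : Nat) : Int) := by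
      push_cast; omega
    rw [PySem.List.pyRange_one_cons hlt, List.foldl_cons]
    have hw : pvSimD simMatrix cxS (pvChar y ((acc.length : Nat) : Int)) = w := by
      have := hF 0 (by omega); simpa using this
    have hdrop1 : P.drop (acc.length + 1) = q :: qt := by
      rw [← List.tail_drop, hdrop]; rfl
    have hPd : P.getD acc.length (0 : Int) = d := pvGetD_of_drop P acc.length d (q :: qt) 0 hdrop
    have hPq : P.getD (acc.length + 1) (0 : Int) = q := pvGetD_of_drop P (acc.length + 1) q qt 0 hdrop1
    simp only [pvSet2, pvGet2, pvGetRow]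
    simp only [show ((acc.length : Int) + 1 - 1) = ((acc.length : Nat) : Int) from by ring,
      show ((E.length : Int) + 1 - 1) = ((E.length : Nat) : Int) from by ring,
      PySem.List.pyGetD_natCast, pvGetD_mid, hPd]
    simp only [show ((acc.length : Int) + 1) = ((acc.length + 1 : Nat) : Int) from by push_cast; ring,
      show ((E.length : Int) + 1) = ((E.length + 1 : Nat) : Int) from by push_cast; ring,
      PySem.List.pyGetD_natCast, PySem.List.pySetD_natCast, hPq, hw,
      pvGetD_mid, pvGetD_mid1, pvSet_mid1]
    try simp only [Nat.zero_add]
    have key := ih qt zt (acc ++ [l]) (min (min (d + w) (q + g)) (l + g)) q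
      (by simpa using hq) (by simpa using hz) (by simpa using hdrop1)
      (by intro t ht
          have h := hF (t + 1) (by omega)
          have e : (acc ++ [l]).length + t = acc.length + (t + 1) := by simp; omega
          rw [e, h]; simp)
    simp only [List.append_assoc, List.singleton_append, List.length_append,
      List.length_cons, List.length_nil, Nat.add_zero] at key
    rw [show ((acc.length + 1 : Nat) : Int) + ((wt.length + 1 : Nat) : Int)
          = ((acc.length + 1 : Nat) : Int) + 1 + ((wt.length : Nat) : Int) from by push_cast; ring]
    rw [show acc.length + (0 + 1) = acc.length + 1 from by norm_num] at *
    simp only [pvSet2, pvGet2, pvGetRow,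
      show ((E.length : Int) + 1 - 1) = ((E.length : Nat) : Int) from by ring,
      PySem.List.pyGetD_natCast] at key
    simp only [show ((E.length : Int) + 1) = ((E.length + 1 : Nat) : Int) from by push_cast; ring,
      PySem.List.pyGetD_natCast, PySem.List.pySetD_natCast] at key
    rw [key]
    simp [pvGo]

-- A's first pass: writing gapPenalty*j into row 0
lemma pvInit (g : Int) (post : List (List Int)) :
    ∀ (zs acc : List Int),
    (PySem.List.pyRange ((acc.length : Int)) ((acc.length : Int) + zs.length) 1).foldl
      (fun mat j => pvSet2 mat 0 j (g * j)) ((acc ++ zs) :: post)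
    = (acc ++ (List.range zs.length).map (fun t => g * ((acc.length + t : Nat) : Int))) :: post := by
  intro zs
  induction zs with
  | nil => intro acc; simp [PySem.List.pyRange_one_eq_nil]
  | cons z zt ih =>
    intro acc
    simp only [List.length_cons]
    have hlt : ((acc.length : Int)) < (acc.length : Int) + ((zt.length + 1 : Nat) : Int) := by
      push_cast; omega
    rw [PySem.List.pyRange_one_cons hlt, List.foldl_cons]
    simp only [pvSet2, pvGetRow, PySem.List.pyGetD_zero, PySem.List.pyGetD_natCast,
      PySem.List.pySetD_natCast, List.getD_cons_zero, pvGetD_mid, pvSet_mid]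
    rw [show PySem.List.pySetD ((acc ++ z :: zt) :: post) 0 (acc ++ g * (acc.length : Int) :: zt)
          = (acc ++ g * (acc.length : Int) :: zt) :: post from by
        rw [PySem.List.pySetD_of_nonneg _ _ (by norm_num)]; rfl]
    have key := ih (acc ++ [g * ((acc.length : Nat) : Int)])
    simp only [List.append_assoc, List.singleton_append, List.length_append,
      List.length_cons, List.length_nil, Nat.add_zero, Nat.zero_add] at key
    simp only [pvSet2, pvGetRow, PySem.List.pyGetD_zero] at key
    rw [show ((acc.length : Int)) + ((zt.length + 1 : Nat) : Int)
          = ((acc.length + 1 : Nat) : Int) + ((zt.length : Nat) : Int) from by push_cast; ring,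
        show ((acc.length : Int)) + 1 = ((acc.length + 1 : Nat) : Int) from by push_cast; ring]
    rw [key]
    have hmap : (g * ((acc.length : Nat) : Int)) :: List.map (fun t => g * (((acc.length + 1 + t : Nat)) : Int)) (List.range zt.length)
        = List.map (fun t => g * (((acc.length + t : Nat)) : Int)) (List.range (zt.length + 1)) := by
      rw [List.range_succ_eq_map, List.map_cons, List.map_map]
      refine congrArg₂ _ (by norm_num) (List.map_congr_left ?_)
      intro t _
      simp only [Function.comp]
      congr 1
      omega
    rw [hmap]

lemma pvStep_length (simMatrix : List (String × List (String × Int))) (yL : List Char) (g : Int)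
    (R : List Int) (cx : Char) (h : R.length = yL.length + 1) :
    (pvStep simMatrix yL g R cx).length = yL.length + 1 := by
  cases R with
  | nil => simp at h
  | cons r0 rs => simp [pvStep, pvGo_length] at *; omega

-- A's outer loop
lemma pvOuterA (simMatrix : List (String × List (String × Int))) (g : Int) (x y : String) :
    ∀ (cs : List Char) (k : Nat) (R : List Int),
    x.toList.drop k = cs →
    R.length = y.toList.length + 1 →
    (PySem.List.pyRange ((k : Int) + 1) ((k : Int) + 1 + cs.length) 1).foldl
      (fun mat i =>
        PySem.List.pySetD
          ((PySem.List.pyRange 1 ((y.toList.length : Int) + 1) 1).foldl (fun mat j =>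
              pvSet2 mat i j
                (min (min (pvGet2 mat (i-1) (j-1) + pvSimD simMatrix (pvChar x (i-1)) (pvChar y (j-1)))
                          (pvGet2 mat (i-1) j + g))
                     (pvGet2 mat i (j-1) + g)))
            (pvSet2 mat i 0 (pvGet2 mat (i-1) 0 + g)))
          (i-1) ([] : List Int))
      (List.replicate k ([] : List Int) ++ R :: List.replicate cs.length (List.replicate (y.toList.length + 1) (0 : Int)))
    = List.replicate (k + cs.length) ([] : List Int) ++ [cs.foldl (pvStep simMatrix y.toList g) R] := by
  intro cs
  induction cs with
  | nil =>
    intro k R hx hR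
    simp [PySem.List.pyRange_one_eq_nil]
  | cons c ct ih =>
    intro k R hx hR
    cases R with
    | nil => simp at hR
    | cons r0 rs =>
    have hrs : rs.length = y.toList.length := by simpa using hR
    simp only [List.length_cons]
    have hlt : ((k : Int) + 1) < (k : Int) + 1 + ((ct.length + 1 : Nat) : Int) := by push_cast; omega
    rw [PySem.List.pyRange_one_cons hlt, List.foldl_cons]
    have hxc : pvChar x ((k : Nat) : Int) = String.singleton c := by
      apply pvChar_natCast
      rw [← List.head?_drop, hx]; rfl
    rw [show List.replicate (ct.length + 1) (List.replicate (y.toList.length + 1) (0 : Int))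
          = List.replicate (y.toList.length + 1) (0 : Int)
            :: List.replicate ct.length (List.replicate (y.toList.length + 1) (0 : Int))
        from List.replicate_succ]
    rw [show List.replicate (y.toList.length + 1) (0 : Int)
          = (0 : Int) :: List.replicate y.toList.length (0 : Int) from List.replicate_succ]
    simp only [pvSet2, pvGet2, pvGetRow,
      show ((k : Int) + 1 - 1) = ((k : Nat) : Int) from by ring,
      PySem.List.pyGetD_natCast, pvGetD_midR, PySem.List.pyGetD_zero, List.getD_cons_zero, hxc]
    simp only [show ((k : Int) + 1) = ((k + 1 : Nat) : Int) from by push_cast; ring,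
      PySem.List.pyGetD_natCast, PySem.List.pySetD_natCast, pvGetD_midR1, pvSet_midR1]
    rw [show PySem.List.pySetD ((0 : Int) :: List.replicate y.toList.length (0 : Int)) 0 (r0 + g)
          = (r0 + g) :: List.replicate y.toList.length (0 : Int) from by
        rw [PySem.List.pySetD_of_nonneg _ _ (by norm_num)]; rfl]
    have key := pvInnerA simMatrix g y (String.singleton c)
      (List.replicate k ([] : List Int))
      (List.replicate ct.length (List.replicate (y.toList.length + 1) (0 : Int)))
      (r0 :: rs) ((k : Int) + 1) (by simp)
      (y.toList.map (fun cy => pvSimD simMatrix (String.singleton c) (String.singleton cy)))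
      rs (List.replicate y.toList.length (0 : Int)) [] (r0 + g) r0
      (by simpa using hrs) (by simp)
      (by simp)
      (by intro t ht
          simp only [List.length_map] at ht
          rw [List.getD_eq_getElem _ _ (by simpa using ht), List.getElem_map]
          rw [show ((([] : List Int).length + t : Nat) : Int) = ((t : Nat) : Int) from by simp]
          rw [pvChar_natCast y t _ (List.getElem?_eq_getElem ht)])
    simp only [pvSet2, pvGet2, pvGetRow,
      show ((k : Int) + 1 - 1) = ((k : Nat) : Int) from by ring,
      PySem.List.pyGetD_natCast] at key
    simp only [show ((k : Int) + 1) = ((k + 1 : Nat) : Int) from by push_cast; ring,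
      PySem.List.pyGetD_natCast, PySem.List.pySetD_natCast] at key
    simp only [List.nil_append, List.length_nil, Nat.cast_zero, zero_add, List.length_map,
      List.length_replicate] at key
    rw [show List.replicate (y.toList.length + 1) (0 : Int)
          = (0 : Int) :: List.replicate y.toList.length (0 : Int) from List.replicate_succ] at key
    rw [show (1 + (y.toList.length : Int)) = ((y.toList.length : Int) + 1) from by ring] at key
    rw [key]
    rw [pvSet_midR]
    have hnewR : (r0 + g) :: pvGo g r0 (r0 + g) rs
          (y.toList.map (fun cy => pvSimD simMatrix (String.singleton c) (String.singleton cy)))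
        = pvStep simMatrix y.toList g (r0 :: rs) c := by simp [pvStep]
    rw [hnewR]
    rw [show List.replicate k ([] : List Int) ++ ([] : List Int)
            :: pvStep simMatrix y.toList g (r0 :: rs) c
            :: List.replicate ct.length ((0 : Int) :: List.replicate y.toList.length (0 : Int))
          = List.replicate (k + 1) ([] : List Int)
            ++ pvStep simMatrix y.toList g (r0 :: rs) c
            :: List.replicate ct.length ((0 : Int) :: List.replicate y.toList.length (0 : Int))
        from by rw [List.replicate_succ', List.append_assoc]; rfl]
    have hx1 : x.toList.drop (k + 1) = ct := by rw [← List.tail_drop, hx]; rfl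
    have hR1 := pvStep_length simMatrix y.toList g (r0 :: rs) c hR
    have key2 := ih (k + 1) (pvStep simMatrix y.toList g (r0 :: rs) c) hx1 hR1
    rw [show List.replicate (y.toList.length + 1) (0 : Int)
          = (0 : Int) :: List.replicate y.toList.length (0 : Int) from List.replicate_succ] at key2
    rw [show (((k + 1 : Nat) : Int) + ((ct.length + 1 : Nat) : Int))
          = ((k + 1 : Nat) : Int) + 1 + ((ct.length : Nat) : Int) from by push_cast; ring]
    simp only [pvSet2, pvGet2, pvGetRow, PySem.List.pyGetD_zero] at key2
    try simp only [PySem.List.pyGetD_zero]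
    rw [key2]
    rw [List.foldl_cons]
    congr 2
    omega

-- ===== the DP characterization: both traversal orders give pvE =====

lemma pvE_nil (w : Char → Char → Int) (g : Int) (ys : List Char) :
    pvE w g [] ys = g * ys.length := by
  simp [pvE]

lemma pvE_cons_nil (w : Char → Char → Int) (g : Int) (a : Char) (xs : List Char) :
    pvE w g (a :: xs) [] = pvE w g xs [] + g := by
  simp [pvE]

lemma pvE_cons_cons (w : Char → Char → Int) (g : Int) (a b : Char) (xs ys : List Char) :
    pvE w g (a :: xs) (b :: ys)
      = min (min (pvE w g xs ys + w a b) (pvE w g xs (b :: ys) + g)) (pvE w g (a :: xs) ys + g) := by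
  simp [pvE]

lemma pvE_nil_right (w : Char → Char → Int) (g : Int) : ∀ (xs : List Char),
    pvE w g xs [] = g * xs.length := by
  intro xs
  induction xs with
  | nil => simp [pvE]
  | cons a t ih => rw [pvE_cons_nil, ih, List.length_cons]; push_cast; ring

lemma pvE_nil_cons (w : Char → Char → Int) (g : Int) (b : Char) (ys : List Char) :
    pvE w g [] (b :: ys) = pvE w g [] ys + g := by
  rw [pvE_nil, pvE_nil, List.length_cons]; push_cast; ring

-- row-major inner scan produces the next row
lemma pvGoRow (w : Char → Char → Int) (g : Int) (a : Char) (rx : List Char) :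
    ∀ (bs ry : List Char),
    pvGo g (pvE w g rx ry) (pvE w g (a :: rx) ry) (pvRowOf w g rx ry bs) (bs.map (w a))
    = pvRowOf w g (a :: rx) ry bs := by
  intro bs
  induction bs with
  | nil => intro ry; simp [pvRowOf, pvGo]
  | cons b bt ih =>
    intro ry
    simp only [pvRowOf, List.map_cons, pvGo]
    rw [← pvE_cons_cons]
    exact congrArg _ (ih (b :: ry))

-- column-major inner scan produces the next column (min arguments re-associated)
lemma pvGoCol (w : Char → Char → Int) (g : Int) (b : Char) (ry : List Char) :
    ∀ (as rx : List Char),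
    pvGo g (pvE w g rx ry) (pvE w g rx (b :: ry)) (pvColOf w g ry rx as) (as.map (fun a => w a b))
    = pvColOf w g (b :: ry) rx as := by
  intro as
  induction as with
  | nil => intro rx; simp [pvColOf, pvGo]
  | cons a at_ ih =>
    intro rx
    simp only [pvColOf, List.map_cons, pvGo]
    have hc : min (min (pvE w g rx ry + w a b) (pvE w g (a :: rx) ry + g)) (pvE w g rx (b :: ry) + g)
        = pvE w g (a :: rx) (b :: ry) := by
      rw [pvE_cons_cons]; omega
    rw [hc]
    exact congrArg _ (ih (a :: rx))

-- A's whole x-loop over rows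
lemma pvFoldRow (simMatrix : List (String × List (String × Int))) (g : Int) (yL : List Char) :
    ∀ (cs rx : List Char),
    cs.foldl (pvStep simMatrix yL g)
        (pvE (pvW simMatrix) g rx [] :: pvRowOf (pvW simMatrix) g rx [] yL)
    = pvE (pvW simMatrix) g (cs.reverse ++ rx) []
        :: pvRowOf (pvW simMatrix) g (cs.reverse ++ rx) [] yL := by
  intro cs
  induction cs with
  | nil => intro rx; simp
  | cons c ct ih =>
    intro rx
    rw [List.foldl_cons]
    have hstep : pvStep simMatrix yL g
          (pvE (pvW simMatrix) g rx [] :: pvRowOf (pvW simMatrix) g rx [] yL) c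
        = pvE (pvW simMatrix) g (c :: rx) [] :: pvRowOf (pvW simMatrix) g (c :: rx) [] yL := by
      simp only [pvStep]
      rw [← pvE_cons_nil (pvW simMatrix) g c rx]
      rw [show yL.map (fun cy => pvSimD simMatrix (String.singleton c) (String.singleton cy))
            = yL.map (pvW simMatrix c) from rfl]
      rw [pvE_cons_nil (pvW simMatrix) g c rx]
      rw [show pvE (pvW simMatrix) g rx [] + g = pvE (pvW simMatrix) g (c :: rx) [] from
            (pvE_cons_nil (pvW simMatrix) g c rx).symm]
      exact congrArg _ (pvGoRow (pvW simMatrix) g c rx yL [])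
    rw [hstep, ih (c :: rx)]
    simp

-- row 0 of the table, as pvE values
lemma pvRowOf_nil (w : Char → Char → Int) (g : Int) : ∀ (bs ry : List Char),
    pvRowOf w g [] ry bs = (List.range bs.length).map (fun t => g * ((ry.length + 1 + t : Nat) : Int)) := by
  intro bs
  induction bs with
  | nil => intro ry; simp [pvRowOf]
  | cons b bt ih =>
    intro ry
    simp only [pvRowOf, List.length_cons, ih (b :: ry)]
    rw [List.range_succ_eq_map, List.map_cons, List.map_map, pvE_nil]
    refine congrArg₂ _ (by rw [List.length_cons]) (List.map_congr_left ?_)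
    intro t _
    simp only [Function.comp]
    congr 1
    omega

-- column 0 of the table, as pvE values
lemma pvColOf_nil (w : Char → Char → Int) (g : Int) : ∀ (as rx : List Char),
    pvColOf w g [] rx as = (List.range as.length).map (fun t => g * ((rx.length + 1 + t : Nat) : Int)) := by
  intro as
  induction as with
  | nil => intro rx; simp [pvColOf]
  | cons a at_ ih =>
    intro rx
    simp only [pvColOf, List.length_cons, ih (a :: rx)]
    rw [List.range_succ_eq_map, List.map_cons, List.map_map, pvE_nil_right]
    refine congrArg₂ _ (by rw [List.length_cons]) (List.map_congr_left ?_)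
    intro t _
    simp only [Function.comp]
    congr 1
    omega

-- bottom element of a column
lemma pvColLast (w : Char → Char → Int) (g : Int) (ry : List Char) :
    ∀ (as rx : List Char) (v : Int), v = pvE w g rx ry →
    (v :: pvColOf w g ry rx as).getD as.length 0 = pvE w g (as.reverse ++ rx) ry := by
  intro as
  induction as with
  | nil => intro rx v hv; simpa using hv
  | cons a at_ ih =>
    intro rx v hv
    simp only [pvColOf, List.length_cons, List.getD_cons_succ]
    rw [ih (a :: rx) (pvE w g (a :: rx) ry) rfl]
    simp

-- B's inner loop (over x) in terms of pvGo
lemma pvInnerB (simMatrix : List (String × List (String × Int))) (g : Int) (x : String)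
    (cyS : String) :
    ∀ (ws qs acc : List Int) (l d : Int),
    qs.length = ws.length →
    (∀ t, t < ws.length → pvSimD simMatrix (pvChar x ((acc.length + t : Nat) : Int)) cyS = ws.getD t 0) →
    ((PySem.List.pyRange ((acc.length : Int) + 1) ((acc.length : Int) + 1 + ws.length) 1).foldl
      (fun (st : List Int × Int) j =>
        (PySem.List.pySetD st.1 j
           (min (min (st.2 + pvSimD simMatrix (pvChar x (j-1)) cyS)
                     (PySem.List.pyGetD st.1 j 0 + g))
                (PySem.List.pyGetD st.1 (j-1) 0 + g)),
         PySem.List.pyGetD st.1 j 0))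
      (acc ++ l :: qs, d)).1
    = acc ++ l :: pvGo g d l qs ws := by
  intro ws
  induction ws with
  | nil =>
    intro qs acc l d hq hF
    have hq0 : qs = [] := List.eq_nil_of_length_eq_zero (by simpa using hq)
    subst hq0
    simp [PySem.List.pyRange_one_eq_nil, pvGo]
  | cons w wt ih =>
    intro qs acc l d hq hF
    cases qs with
    | nil => simp at hq
    | cons q qt =>
    simp only [List.length_cons] at hq hF ⊢
    have hlt : ((acc.length : Int) + 1) < (acc.length : Int) + 1 + ((wt.length + 1 : Nat) : Int) := by
      push_cast; omega
    rw [PySem.List.pyRange_one_cons hlt, List.foldl_cons]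
    have hw : pvSimD simMatrix (pvChar x ((acc.length : Nat) : Int)) cyS = w := by
      have := hF 0 (by omega); simpa using this
    simp only [show ((acc.length : Int) + 1 - 1) = ((acc.length : Nat) : Int) from by ring,
      hw, PySem.List.pyGetD_natCast, pvGetD_mid]
    have h1 : ((acc.length : Int) + 1) = ((acc.length + 1 : Nat) : Int) := by push_cast; ring
    simp only [h1, PySem.List.pyGetD_natCast, PySem.List.pySetD_natCast, pvGetD_mid1, pvSet_mid1]
    have key := ih qt (acc ++ [l]) (min (min (d + w) (q + g)) (l + g)) q (by simpa using hq)
      (by intro t ht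
          have h := hF (t + 1) (by omega)
          have e : (acc ++ [l]).length + t = acc.length + (t + 1) := by simp; omega
          rw [e, h]; simp)
    simp only [List.append_assoc, List.singleton_append, List.length_append,
      List.length_cons, List.length_nil, Nat.add_zero] at key
    rw [show ((acc.length + 1 : Nat) : Int) + ((wt.length + 1 : Nat) : Int)
          = ((acc.length + 1 : Nat) : Int) + 1 + ((wt.length : Nat) : Int) from by push_cast; ring]
    rw [key]
    simp [pvGo]

-- B's outer loop over y: columns advance, the out list collects column bottoms
lemma pvOuterB (simMatrix : List (String × List (String × Int))) (g : Int) (x : String) :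
    ∀ (bs ry : List Char) (acc : List Int),
    bs.foldl (fun (st : List Int × List Int) cy =>
      (((PySem.List.pyRange 1 ((x.toList.length : Int) + 1) 1).foldl (fun (st2 : List Int × Int) i =>
          (PySem.List.pySetD st2.1 i
             (min (min (st2.2 + pvSimD simMatrix (pvChar x (i-1)) (String.singleton cy))
                       (PySem.List.pyGetD st2.1 i 0 + g))
                  (PySem.List.pyGetD st2.1 (i-1) 0 + g)),
           PySem.List.pyGetD st2.1 i 0))
        (PySem.List.pySetD st.1 0 (PySem.List.pyGetD st.1 0 0 + g), PySem.List.pyGetD st.1 0 0)).1,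
       st.2 ++ [PySem.List.pyGetD
         ((PySem.List.pyRange 1 ((x.toList.length : Int) + 1) 1).foldl (fun (st2 : List Int × Int) i =>
            (PySem.List.pySetD st2.1 i
               (min (min (st2.2 + pvSimD simMatrix (pvChar x (i-1)) (String.singleton cy))
                         (PySem.List.pyGetD st2.1 i 0 + g))
                    (PySem.List.pyGetD st2.1 (i-1) 0 + g)),
             PySem.List.pyGetD st2.1 i 0))
          (PySem.List.pySetD st.1 0 (PySem.List.pyGetD st.1 0 0 + g), PySem.List.pyGetD st.1 0 0)).1
         ((x.toList.length : Nat) : Int) 0]))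
      (pvE (pvW simMatrix) g [] ry :: pvColOf (pvW simMatrix) g ry [] x.toList, acc)
    = (pvE (pvW simMatrix) g [] (bs.reverse ++ ry)
         :: pvColOf (pvW simMatrix) g (bs.reverse ++ ry) [] x.toList,
       acc ++ pvRowOf (pvW simMatrix) g x.toList.reverse ry bs) := by
  intro bs
  induction bs with
  | nil => intro ry acc; simp [pvRowOf]
  | cons b bt ih =>
    intro ry acc
    rw [List.foldl_cons]
    have hcol : ((PySem.List.pyRange 1 ((x.toList.length : Int) + 1) 1).foldl (fun (st2 : List Int × Int) i =>
          (PySem.List.pySetD st2.1 i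
             (min (min (st2.2 + pvSimD simMatrix (pvChar x (i-1)) (String.singleton b))
                       (PySem.List.pyGetD st2.1 i 0 + g))
                  (PySem.List.pyGetD st2.1 (i-1) 0 + g)),
           PySem.List.pyGetD st2.1 i 0))
        (PySem.List.pySetD
           (pvE (pvW simMatrix) g [] ry :: pvColOf (pvW simMatrix) g ry [] x.toList) 0
           (PySem.List.pyGetD
             (pvE (pvW simMatrix) g [] ry :: pvColOf (pvW simMatrix) g ry [] x.toList) 0 0 + g),
         PySem.List.pyGetD
           (pvE (pvW simMatrix) g [] ry :: pvColOf (pvW simMatrix) g ry [] x.toList) 0 0)).1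
        = pvE (pvW simMatrix) g [] (b :: ry) :: pvColOf (pvW simMatrix) g (b :: ry) [] x.toList := by
      simp only [PySem.List.pyGetD_zero, List.getD_cons_zero]
      rw [show PySem.List.pySetD
            (pvE (pvW simMatrix) g [] ry :: pvColOf (pvW simMatrix) g ry [] x.toList) 0
            (pvE (pvW simMatrix) g [] ry + g)
          = (pvE (pvW simMatrix) g [] ry + g) :: pvColOf (pvW simMatrix) g ry [] x.toList from by
        rw [PySem.List.pySetD_of_nonneg _ _ (by norm_num)]; rfl]
      have hlen : (pvColOf (pvW simMatrix) g ry [] x.toList).length = x.toList.length := by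
        clear ih
        generalize ([] : List Char) = rx
        induction x.toList generalizing rx with
        | nil => simp [pvColOf]
        | cons a t iht => simp [pvColOf, iht]
      have key := pvInnerB simMatrix g x (String.singleton b)
        (x.toList.map (fun a => pvW simMatrix a b))
        (pvColOf (pvW simMatrix) g ry [] x.toList) [] (pvE (pvW simMatrix) g [] ry + g)
        (pvE (pvW simMatrix) g [] ry)
        (by simpa using hlen)
        (by intro t ht
            simp only [List.length_map] at ht
            rw [List.getD_eq_getElem _ _ (by simpa using ht), List.getElem_map]
            rw [show ((([] : List Int).length + t : Nat) : Int) = ((t : Nat) : Int) from by simp]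
            rw [pvChar_natCast x t _ (List.getElem?_eq_getElem ht)]
            rfl)
      simp only [List.nil_append, List.length_nil, Nat.cast_zero, zero_add, List.length_map] at key
      rw [show ((x.toList.length : Int) + 1) = 1 + (x.toList.length : Int) from by ring]
      rw [key]
      rw [show pvE (pvW simMatrix) g [] ry + g = pvE (pvW simMatrix) g [] (b :: ry) from
            (pvE_nil_cons (pvW simMatrix) g b ry).symm]
      exact congrArg _ (pvGoCol (pvW simMatrix) g b ry x.toList [])
    rw [hcol]
    rw [PySem.List.pyGetD_natCast]
    rw [show (pvE (pvW simMatrix) g [] (b :: ry) :: pvColOf (pvW simMatrix) g (b :: ry) [] x.toList).getD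
          x.toList.length 0
        = pvE (pvW simMatrix) g (x.toList.reverse ++ []) (b :: ry) from by
      have h := pvColLast (pvW simMatrix) g (b :: ry) x.toList [] (pvE (pvW simMatrix) g [] (b :: ry)) rfl
      simpa using h]
    rw [ih (b :: ry) (acc ++ [pvE (pvW simMatrix) g (x.toList.reverse ++ []) (b :: ry)])]
    simp [pvRowOf]

theorem forwards_spec : Claim_equal_forwards := by
  intro x y simMatrix g _ _
  unfold Spec_forwards
  have hA : forwards x y simMatrix g
      = x.toList.foldl (pvStep simMatrix y.toList g)
          ((List.range (y.toList.length + 1)).map (fun t => g * ((t : Nat) : Int))) := by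
    simp only [forwards, PySem.Str.len_eq]
    rw [PySem.List.foldl_append_singleton_eq_map
          (fun _ => PySem.List.pyRepeat [(0 : Int)] ((y.toList.length : Int) + 1))]
    rw [List.nil_append, List.map_const', PySem.List.length_pyRange_one,
        PySem.List.pyRepeat_singleton]
    rw [show (((x.toList.length : Int) + 1 - 0).toNat) = x.toList.length + 1 from by omega,
        show (((y.toList.length : Int) + 1).toNat) = y.toList.length + 1 from by omega]
    rw [List.replicate_succ]
    have key3 := pvInit g
      (List.replicate x.toList.length (List.replicate (y.toList.length + 1) (0 : Int)))
      (List.replicate (y.toList.length + 1) (0 : Int)) []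
    simp only [List.nil_append, List.length_nil, Nat.cast_zero, zero_add,
      List.length_replicate] at key3
    rw [show ((y.toList.length + 1 : Nat) : Int) = ((y.toList.length : Int) + 1) from by push_cast; ring] at key3
    rw [key3]
    try simp only [Nat.zero_add]
    have key4 := pvOuterA simMatrix g x y x.toList 0
      ((List.range (y.toList.length + 1)).map (fun t => g * ((t : Nat) : Int)))
      (by simp) (by simp)
    simp only [List.replicate_zero, List.nil_append, Nat.cast_zero, zero_add,
      Nat.zero_add, List.length_replicate] at key4
    rw [show (1 + (x.toList.length : Int)) = ((x.toList.length : Int) + 1) from by ring] at key4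
    rw [key4]
    rw [PySem.List.pyGetD_natCast, pvGetD_midR]
  have hrow0 : (List.range (y.toList.length + 1)).map (fun t => g * ((t : Nat) : Int))
      = pvE (pvW simMatrix) g [] [] :: pvRowOf (pvW simMatrix) g [] [] y.toList := by
    rw [pvRowOf_nil, pvE_nil, List.range_succ_eq_map, List.map_cons, List.map_map]
    refine congrArg₂ _ (by simp) (List.map_congr_left ?_)
    intro t _
    simp only [Function.comp, List.length_nil]
    congr 1
    omega
  have hA2 : x.toList.foldl (pvStep simMatrix y.toList g)
        ((List.range (y.toList.length + 1)).map (fun t => g * ((t : Nat) : Int)))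
      = pvE (pvW simMatrix) g (x.toList.reverse ++ []) []
          :: pvRowOf (pvW simMatrix) g (x.toList.reverse ++ []) [] y.toList := by
    rw [hrow0]
    exact pvFoldRow simMatrix g y.toList x.toList []
  have hcol0 : (PySem.List.pyRange 0 ((x.toList.length : Int) + 1) 1).map (fun i => g * i)
      = pvE (pvW simMatrix) g [] [] :: pvColOf (pvW simMatrix) g [] [] x.toList := by
    rw [PySem.List.pyRange_one 0 ((x.toList.length : Int) + 1), List.map_map]
    rw [show (((x.toList.length : Int) + 1 - 0).toNat) = x.toList.length + 1 from by omega]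
    rw [pvColOf_nil, pvE_nil, List.range_succ_eq_map, List.map_cons, List.map_map]
    refine congrArg₂ _ (by simp [Function.comp]) (List.map_congr_left ?_)
    intro t _
    simp only [Function.comp, List.length_nil]
    push_cast
    ring
  have hB : forwards_alt x y simMatrix g
      = pvE (pvW simMatrix) g (x.toList.reverse ++ []) []
          :: pvRowOf (pvW simMatrix) g (x.toList.reverse ++ []) [] y.toList := by
    simp only [forwards_alt, PySem.Str.len_eq]
    rw [hcol0]
    rw [PySem.List.pyGetD_natCast]
    rw [show (pvE (pvW simMatrix) g [] [] :: pvColOf (pvW simMatrix) g [] [] x.toList).getD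
          x.toList.length 0
        = pvE (pvW simMatrix) g (x.toList.reverse ++ []) [] from by
      have h := pvColLast (pvW simMatrix) g [] x.toList [] (pvE (pvW simMatrix) g [] []) rfl
      simpa using h]
    rw [pvOuterB simMatrix g x y.toList [] [pvE (pvW simMatrix) g (x.toList.reverse ++ []) []]]
    simp
  rw [hA, hA2, hB]
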